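-- pv_equiv track=rewrite | github.com/pypi-data/pypi-mirror-332 | packages/nucleus-sdk-python/nucleus_sdk_python-0.1.1-py3-none-any.whl/nucleus_sdk_python/utils.py | parse_argument_types
-- ===== SOURCE A (Python) =====
-- def parse_argument_types(signature: str):
--     """
--     Parses the argument types from a Solidity function signature, including nested structs.
--     (Chat GPT generated)
--     :param signature: The function signature, e.g., "doSomething((address,uint256),uint256)"
--     :return: List of argument types, e.g., ['(address,uint256)', 'uint256']
--     """
--     # Extract the part inside parentheses
--     args_str = signature[signature.index('(') + 1: signature.rindex(')')]
--
--     # Recursive helper function to split types, respecting nested parentheses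
--     def split_types(s):
--         types = []
--         current = ""
--         depth = 0
--
--         for char in s:
--             if char == "," and depth == 0:  # Split at top-level commas
--                 types.append(current.strip())
--                 current = ""
--             else:
--                 if char == "(":
--                     depth += 1
--                 elif char == ")":
--                     depth -= 1
--                 current += char
--
--         if current:  # Append the last type
--             types.append(current.strip())
--
--         return types
--
--     # Split top-level argument types
--     return split_types(args_str)
-- ===== SOURCE B (Python) =====
-- def parse_argument_types(signature: str):
--     # Extract the part inside parentheses
--     args_str = signature[signature.index('(') + 1: signature.rindex(')')]
--
--     # Recursive descent: peel off the text up to the first top-level comma,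
--     # recurse on the remainder; no running accumulators.
--     def split_head(s):
--         depth = 0
--         for i, ch in enumerate(s):
--             if ch == ',' and depth == 0:
--                 return [s[:i].strip()] + split_head(s[i + 1:])
--             if ch == '(':
--                 depth += 1
--             elif ch == ')':
--                 depth -= 1
--         return [s.strip()] if s else []
--
--     return split_head(args_str)
-- ===== Notes on version B (the rewrite author's own statement) =====
-- stated objective: alternative
-- what changed: Replaces A's single-pass accumulator loop (types list + current buffer + post-loop flush) by a recursion that finds the first top-level comma, slices off the head piece and recurses on the remainder, with no running accumulators.
import Mathlib
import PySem

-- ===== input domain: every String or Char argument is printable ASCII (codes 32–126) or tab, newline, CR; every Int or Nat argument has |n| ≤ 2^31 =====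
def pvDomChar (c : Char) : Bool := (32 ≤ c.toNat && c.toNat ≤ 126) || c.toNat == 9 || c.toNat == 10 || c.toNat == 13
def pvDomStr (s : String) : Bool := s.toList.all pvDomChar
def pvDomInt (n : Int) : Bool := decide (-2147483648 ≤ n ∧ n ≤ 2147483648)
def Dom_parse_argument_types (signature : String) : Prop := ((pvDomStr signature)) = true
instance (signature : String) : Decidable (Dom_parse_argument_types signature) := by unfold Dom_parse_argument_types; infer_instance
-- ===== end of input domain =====

-- B replaces A's accumulator loop by recursion that slices off the piece before the first
-- top-level comma and recurses on the remainder (alternative decomposition, same results).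

-- ===== PORT A =====
-- depth update shared by both ports (the identical if/elif lines of both Pythons)
def pvAdj (c : Char) (d : Int) : Int := if c = '(' then d + 1 else if c = ')' then d - 1 else d

-- one iteration of A's for-loop: state (types, current, depth)
def pvAStep (st : List (List Char) × List Char × Int) (c : Char) :
    List (List Char) × List Char × Int :=
  if c = ',' ∧ st.2.2 = 0 then (st.1 ++ [PySem.Chars.strip st.2.1], ([], st.2.2))
  else (st.1, (st.2.1 ++ [c], pvAdj c st.2.2))

def parse_argument_types (signature : String) : List String :=
  let sig := signature.toList
  let args := PySem.List.slice sig (some (PySem.Chars.find sig ['('] + 1))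
                (some (PySem.Chars.rfind sig [')']))
  let st := args.foldl pvAStep ([], ([], 0))
  (if st.2.1 ≠ [] then st.1 ++ [PySem.Chars.strip st.2.1] else st.1).map String.ofList

-- ===== PORT B =====
-- B's inner for-loop: index of the first comma at depth 0 (early return), none if no such comma
def pvFindTop : List Char → Int → Option Nat
  | [], _ => none
  | c :: cs, d => if c = ',' ∧ d = 0 then some 0 else (pvFindTop cs (pvAdj c d)).map (· + 1)

-- B's split_head: peel the piece before the first top-level comma, recurse on the rest
def pvRec (s : List Char) : List (List Char) :=
  match h : pvFindTop s 0 with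
  | some i => PySem.Chars.strip (s.take i) :: pvRec (s.drop (i + 1))
  | none => if s ≠ [] then [PySem.Chars.strip s] else []
termination_by s.length
decreasing_by
  cases s with
  | nil => simp [pvFindTop] at h
  | cons c cs => simp [List.length_drop]

def parse_argument_types_alt (signature : String) : List String :=
  let sig := signature.toList
  let args := PySem.List.slice sig (some (PySem.Chars.find sig ['('] + 1))
                (some (PySem.Chars.rfind sig [')']))
  (pvRec args).map String.ofList

-- ===== PRECONDITION & SPEC =====
-- Pre_: Python A raises ValueError (index/rindex) iff '(' or ')' is absent from the signature.
def Pre_parse_argument_types (signature : String) : Prop :=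
  '(' ∈ signature.toList ∧ ')' ∈ signature.toList
instance (signature : String) : Decidable (Pre_parse_argument_types signature) := by
  unfold Pre_parse_argument_types; infer_instance

def pvWitness_parse_argument_types : String := "f((address,uint256),uint256)"

def Spec_parse_argument_types (signature : String) (out : List String) : Prop :=
  out = parse_argument_types_alt signature
instance (signature : String) (out : List String) : Decidable (Spec_parse_argument_types signature out) := by
  unfold Spec_parse_argument_types; infer_instance

-- ===== CLAIM (what is proved, stated in full; the proofs are below) =====
def Claim_equal_parse_argument_types : Prop := ∀ (signature : String), Dom_parse_argument_types signature → Pre_parse_argument_types signature → Spec_parse_argument_types signature (parse_argument_types signature)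

-- ===== LEMMAS AND PROOFS =====

-- common reference: the raw pieces of s between top-level commas (never empty as a list)
def pvSplit : List Char → Int → List (List Char)
  | [], _ => [[]]
  | c :: cs, d =>
      if c = ',' ∧ d = 0 then [] :: pvSplit cs 0
      else (pvSplit cs (pvAdj c d)).modifyHead (c :: ·)

-- the common post-processing: strip every piece, drop the last iff it is empty
lemma pvModifyHead_nil_append (l : List (List Char)) :
    List.modifyHead (fun x => ([] : List Char) ++ x) l = l := by
  cases l <;> simp [List.modifyHead]

def pvProcess (ps : List (List Char)) : List (List Char) :=
  ps.dropLast.map PySem.Chars.strip ++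
    (match ps.getLast? with
     | some l => if l ≠ [] then [PySem.Chars.strip l] else []
     | none => [])

lemma pvSplit_ne_nil (s : List Char) (d : Int) : pvSplit s d ≠ [] := by
  induction s generalizing d with
  | nil => simp [pvSplit]
  | cons c cs ih =>
      simp only [pvSplit]
      split_ifs
      · simp
      · have := ih (pvAdj c d)
        cases h : pvSplit cs (pvAdj c d) with
        | nil => exact absurd h this
        | cons a t => simp [List.modifyHead]

lemma pvProcess_cons (x : List Char) (rest : List (List Char)) (h : rest ≠ []) :
    pvProcess (x :: rest) = PySem.Chars.strip x :: pvProcess rest := by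
  cases rest with
  | nil => exact absurd rfl h
  | cons y t => simp [pvProcess, List.getLast?_cons_cons]

lemma pvAFold (s : List Char) : ∀ (ts : List (List Char)) (cur : List Char) (d : Int),
    (if (s.foldl pvAStep (ts, (cur, d))).2.1 ≠ [] then
        (s.foldl pvAStep (ts, (cur, d))).1 ++ [PySem.Chars.strip (s.foldl pvAStep (ts, (cur, d))).2.1]
      else (s.foldl pvAStep (ts, (cur, d))).1)
      = ts ++ pvProcess ((pvSplit s d).modifyHead (cur ++ ·)) := by
  induction s with
  | nil =>
      intro ts cur d
      simp only [List.foldl_nil, pvSplit, List.modifyHead, pvProcess]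
      split_ifs <;> simp_all
  | cons c cs ih =>
      intro ts cur d
      by_cases hc : c = ',' ∧ d = 0
      · obtain ⟨hc1, hc2⟩ := hc
        subst hc1 hc2
        rw [List.foldl_cons]
        have hstep : pvAStep (ts, (cur, 0)) ',' = (ts ++ [PySem.Chars.strip cur], ([], 0)) := by
          simp [pvAStep]
        rw [hstep, ih]
        rw [pvModifyHead_nil_append]
        have hsplit : pvSplit (',' :: cs) 0 = [] :: pvSplit cs 0 := by simp [pvSplit]
        rw [hsplit]
        have hmod2 : (([] : List Char) :: pvSplit cs 0).modifyHead (cur ++ ·) = cur :: pvSplit cs 0 := by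
          simp [List.modifyHead]
        rw [hmod2, pvProcess_cons cur _ (pvSplit_ne_nil cs 0)]
        simp
      · rw [List.foldl_cons]
        have hstep : pvAStep (ts, (cur, d)) c = (ts, (cur ++ [c], pvAdj c d)) := by
          simp [pvAStep, hc]
        rw [hstep, ih]
        have hsplit : pvSplit (c :: cs) d = (pvSplit cs (pvAdj c d)).modifyHead (c :: ·) := by
          simp [pvSplit, hc]
        rw [hsplit]
        have hcomp : ((pvSplit cs (pvAdj c d)).modifyHead (c :: ·)).modifyHead (cur ++ ·)
            = (pvSplit cs (pvAdj c d)).modifyHead ((cur ++ [c]) ++ ·) := by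
          cases pvSplit cs (pvAdj c d) with
          | nil => rfl
          | cons a t => simp [List.modifyHead]
        rw [hcomp]

lemma pvFindTop_none_split (s : List Char) : ∀ (d : Int),
    pvFindTop s d = none → pvSplit s d = [s] := by
  induction s with
  | nil => intro d _; rfl
  | cons c cs ih =>
      intro d h
      by_cases hc : c = ',' ∧ d = 0
      · simp [pvFindTop, hc] at h
      · simp only [pvFindTop, if_neg hc, Option.map_eq_none_iff] at h
        simp [pvSplit, hc, ih _ h, List.modifyHead]

lemma pvFindTop_some_split (s : List Char) : ∀ (d : Int) (i : Nat),
    pvFindTop s d = some i → pvSplit s d = s.take i :: pvSplit (s.drop (i + 1)) 0 := by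
  induction s with
  | nil => intro d i h; simp [pvFindTop] at h
  | cons c cs ih =>
      intro d i h
      by_cases hc : c = ',' ∧ d = 0
      · obtain ⟨hc1, hc2⟩ := hc
        subst hc1 hc2
        simp [pvFindTop] at h
        subst h
        simp [pvSplit]
      · simp only [pvFindTop, if_neg hc] at h
        obtain ⟨j, hj, hij⟩ := Option.map_eq_some_iff.mp h
        subst hij
        have := ih _ _ hj
        simp [pvSplit, hc, this, List.modifyHead]

lemma pvRec_eq (s : List Char) : pvRec s = pvProcess (pvSplit s 0) := by
  fun_induction pvRec s with
  | case1 s i h ih =>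
      rw [pvFindTop_some_split s 0 i h,
          pvProcess_cons _ _ (pvSplit_ne_nil _ 0), ih]
  | case2 s h hne =>
      rw [pvFindTop_none_split s 0 h]
      simp [pvProcess, hne]
  | case3 s h hne =>
      have hs : s = [] := by simpa using hne
      subst hs
      simp [pvProcess, pvSplit]

-- ===== VERDICT (by name: the statement is the Claim_ definition above) =====
theorem parse_argument_types_spec : Claim_equal_parse_argument_types := by
  intro signature _ _
  unfold Spec_parse_argument_types parse_argument_types parse_argument_types_alt
  simp only []
  rw [pvAFold _ [] [] 0, pvRec_eq, pvModifyHead_nil_append]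
  simp
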